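-- pv_equiv track=rewrite | github.com/PavelKassitchev/programming-python | 013_list/tasks/task01.py | max_abs
-- ===== SOURCE A (Python) =====
-- def max_abs(num_list):
--     if len(num_list) == 0:
--         return None
--     max_val = 0
--     val = 0
--     for el in num_list:
--         if abs(el) > abs(max_val):
--             max_val = abs(el)
--             val = el
--     return val
-- ===== SOURCE B (Python) =====
-- def max_abs(num_list):
--     if not num_list:
--         return None
--     m = max(abs(x) for x in num_list)
--     for el in num_list:
--         if abs(el) == m:
--             return el
-- ===== Notes on version B (the rewrite author's own statement) =====
-- stated objective: simpler
-- what changed: Replaces A's single combined fold that tracks (max_val, val) with two separate passes: first reduce to the maximum absolute value, then a linear search for the first element attaining it.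
import Mathlib
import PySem

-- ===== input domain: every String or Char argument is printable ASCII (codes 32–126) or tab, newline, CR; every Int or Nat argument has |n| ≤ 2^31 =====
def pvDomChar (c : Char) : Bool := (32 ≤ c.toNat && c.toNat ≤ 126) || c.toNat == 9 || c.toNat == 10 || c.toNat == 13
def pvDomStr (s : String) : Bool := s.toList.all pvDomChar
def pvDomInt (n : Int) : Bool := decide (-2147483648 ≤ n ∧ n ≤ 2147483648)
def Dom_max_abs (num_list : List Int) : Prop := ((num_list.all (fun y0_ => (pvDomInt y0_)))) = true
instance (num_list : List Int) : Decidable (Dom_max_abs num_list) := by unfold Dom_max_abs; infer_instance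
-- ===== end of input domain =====

-- B replaces A's single fold tracking (max_val, val) by two passes (max of abs, then first match); objective: simpler.


-- ===== PORT A =====
def max_abs (num_list : List Int) : Option Int :=
  if num_list.length = 0 then none
  else
    -- the loop carries (max_val, val) exactly as the Python does
    let p := num_list.foldl (fun (p : Int × Int) el => if |el| > |p.1| then (|el|, el) else p) (0, 0)
    some p.2

-- ===== PORT B =====
def max_abs_alt (num_list : List Int) : Option Int :=
  match num_list with
  | [] => none
  | a :: t =>
    -- m = max(abs(x) for x in num_list)
    let m := (t.map (fun x => |x|)).foldl max |a|
    -- first element whose absolute value equals m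
    (a :: t).find? (fun el => |el| == m)

-- ===== PRECONDITION & SPEC =====
def Spec_max_abs (num_list : List Int) (out : Option Int) : Prop := out = max_abs_alt num_list
instance (num_list : List Int) (out : Option Int) : Decidable (Spec_max_abs num_list out) := by unfold Spec_max_abs; infer_instance

-- ===== CLAIM (what is proved, stated in full; the proofs are below) =====
def Claim_equal_max_abs : Prop := ∀ (num_list : List Int), Dom_max_abs num_list → Spec_max_abs num_list (max_abs num_list)

-- ===== LEMMAS AND PROOFS =====

/-- A's loop on just the current element `val` (its `max_val` is always `|val|`). -/
def gstep (v el : Int) : Int := if |el| > |v| then el else v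

lemma le_foldl_max (l : List Int) (x : Int) : x ≤ l.foldl max x := by
  induction l generalizing x with
  | nil => simp
  | cons y l ih =>
    simp only [List.foldl_cons]
    exact le_trans (le_max_left x y) (ih (max x y))

lemma pair_fold (L : List Int) (v : Int) :
    L.foldl (fun (p : Int × Int) el => if |el| > |p.1| then (|el|, el) else p) (|v|, v)
      = (|L.foldl gstep v|, L.foldl gstep v) := by
  induction L generalizing v with
  | nil => simp
  | cons a L ih =>
    simp only [List.foldl_cons, gstep]
    by_cases h : |a| > |v| <;> simp [h, ih]

lemma gstep_zero (a : Int) : gstep 0 a = a := by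
  unfold gstep
  by_cases h : |a| > |(0:Int)|
  · rw [if_pos h]
  · have : a = 0 := by simp at h; omega
    rw [if_neg h, this]

lemma main_lemma (t : List Int) (a : Int) :
    List.find? (fun el => |el| == (t.map (fun x => |x|)).foldl max |a|) (a :: t)
      = some (t.foldl gstep a) := by
  induction t generalizing a with
  | nil => simp
  | cons b t ih =>
    simp only [List.map_cons, List.foldl_cons, gstep]
    by_cases h : |b| > |a|
    · rw [if_pos h, max_eq_right (le_of_lt h)]
      have hb : |b| ≤ (t.map (fun x => |x|)).foldl max |b| := le_foldl_max _ _
      have ha : ¬ ((fun el => |el| == (t.map (fun x => |x|)).foldl max |b|) a) = true := by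
        simp only [beq_iff_eq]; omega
      rw [List.find?_cons_of_neg (p := fun el => |el| == (t.map (fun x => |x|)).foldl max |b|) ha]
      exact ih b
    · rw [if_neg h, max_eq_left (by omega)]
      set m := (t.map (fun x => |x|)).foldl max |a| with hmdef
      have ha' : |a| ≤ m := le_foldl_max _ _
      by_cases hp : ((fun el => |el| == m) a) = true
      · rw [List.find?_cons_of_pos (p := fun el => |el| == m) hp]
        have h2 := ih a
        rw [List.find?_cons_of_pos (p := fun el => |el| == m) hp] at h2
        exact h2
      · have hm : |a| < m := by simp only [beq_iff_eq] at hp; omega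
        have hbp : ¬ ((fun el => |el| == m) b) = true := by
          simp only [beq_iff_eq]; omega
        rw [List.find?_cons_of_neg (p := fun el => |el| == m) hp, List.find?_cons_of_neg (p := fun el => |el| == m) hbp]
        have h2 := ih a
        rw [List.find?_cons_of_neg (p := fun el => |el| == m) hp] at h2
        exact h2

-- ===== VERDICT (by name: the statement is the Claim_ definition above) =====
theorem max_abs_spec : Claim_equal_max_abs := by
  intro L _
  unfold Spec_max_abs max_abs max_abs_alt
  match L with
  | [] => simp
  | a :: t =>
    have h2 : ((0:Int), (0:Int)) = (|(0:Int)|, (0:Int)) := by norm_num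
    simp only [List.length_cons, h2, pair_fold (a :: t) 0, List.foldl_cons, gstep_zero,
      main_lemma t a]
    simp
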